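-- pv_equiv track=rewrite | github.com/MrBrantCode/unitest_baseline | mut_generate/mist_train_cf/cf_69641/solution.py | categorized_counter
-- ===== SOURCE A (Python) =====
-- def categorized_counter(s):
--     count = {'alphabet': {}, 'number': {}, 'punctuation': {}}
--     for char in s:
--         if char == ' ':
--             continue
--         elif char.isalpha():
--             char = char.lower()
--             if char in count['alphabet']:
--                 count['alphabet'][char] += 1
--             else:
--                 count['alphabet'][char] = 1
--         elif char.isdigit():
--             if char in count['number']:
--                 count['number'][char] += 1
--             else:
--                 count['number'][char] = 1
--         else:
--             if char in count['punctuation']: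
--                 count['punctuation'][char] += 1
--             else:
--                 count['punctuation'][char] = 1
--
--     max_alpha_count = max(count['alphabet'].values()) if count['alphabet'] else 0
--     max_num_count = max(count['number'].values()) if count['number'] else 0
--     max_punct_count = max(count['punctuation'].values()) if count['punctuation'] else 0
--
--     count['alphabet'] = {key: value for key, value in count['alphabet'].items() if value == max_alpha_count}
--     count['number'] = {key: value for key, value in count['number'].items() if value == max_num_count}
--     count['punctuation'] = {key: value for key, value in count['punctuation'].items() if value == max_punct_count}
--
--     return count
-- ===== SOURCE B (Python) =====
-- def categorized_counter(s):
--     # normalize once (drop spaces, lowercase letters), then build each category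
--     # independently: distinct keys in first-appearance order, counts via list.count
--     norm = [c.lower() if c.isalpha() else c for c in s if c != ' ']
--
--     def bucket(pred):
--         keys = []
--         for c in norm:
--             if pred(c) and c not in keys:
--                 keys.append(c)
--         counts = [norm.count(k) for k in keys]
--         m = max(counts) if counts else 0
--         return {k: n for k, n in zip(keys, counts) if n == m}
--
--     return {'alphabet': bucket(str.isalpha),
--             'number': bucket(str.isdigit),
--             'punctuation': bucket(lambda c: not c.isalpha() and not c.isdigit())}
-- ===== Notes on version B (the rewrite author's own statement) =====
-- stated objective: alternative
-- what changed: A maintains three incrementally-updated count dicts while scanning the characters; B keeps no counting dict at all: it normalizes the string once (drops spaces, lowercases letters), then builds each category independently by collecting its distinct keys in first-appearance order and computing each key's frequency with list.count, before the same max-frequency filtering.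
import Mathlib
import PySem

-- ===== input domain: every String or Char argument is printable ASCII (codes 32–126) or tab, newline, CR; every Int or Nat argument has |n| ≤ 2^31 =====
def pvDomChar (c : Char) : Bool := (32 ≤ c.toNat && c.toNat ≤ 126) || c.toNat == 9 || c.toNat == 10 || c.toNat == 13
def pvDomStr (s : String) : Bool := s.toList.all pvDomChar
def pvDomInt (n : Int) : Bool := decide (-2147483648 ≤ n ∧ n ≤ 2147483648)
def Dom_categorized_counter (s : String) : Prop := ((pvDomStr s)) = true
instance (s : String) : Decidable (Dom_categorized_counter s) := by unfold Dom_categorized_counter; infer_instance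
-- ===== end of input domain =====

-- B drops A's three incrementally-updated count dicts: it normalizes the string once and builds
-- each category from its distinct keys (first-appearance order) with list.count; same value,
-- different algorithm (objective: alternative).

-- ===== PORT A =====
-- A's inner 'if char in d: d[char] += 1 else: d[char] = 1' pattern, used by all three branches
def pvBump (d : PySem.Dict String Int) (k : String) : PySem.Dict String Int :=
  if d.contains k then d.insert k (d.getD k 0 + 1) else d.insert k 1

-- one iteration of A's 'for char in s' loop over the three category dicts
def pvStepA (acc : PySem.Dict String Int × PySem.Dict String Int × PySem.Dict String Int)
    (c : Char) : PySem.Dict String Int × PySem.Dict String Int × PySem.Dict String Int :=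
  if c = ' ' then acc
  else if PySem.Chars.isalpha c then
    (pvBump acc.1 (String.ofList [PySem.Chars.lowerChar c]), acc.2.1, acc.2.2)
  else if PySem.Chars.isdigit c then
    (acc.1, pvBump acc.2.1 (String.ofList [c]), acc.2.2)
  else
    (acc.1, acc.2.1, pvBump acc.2.2 (String.ofList [c]))

-- 'max(d.values()) if d else 0' and then '{k: v for k, v in d.items() if v == m}'
def pvMaxFilter (d : PySem.Dict String Int) : PySem.Dict String Int :=
  let m : Int := if d.items.isEmpty then 0 else (PySem.List.max? d.values (fun v => v)).getD 0
  PySem.Dict.mk (d.items.filter (fun kv => kv.2 == m))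

-- A's outer dict has the three fixed keys 'alphabet','number','punctuation' reassigned in
-- place, so it is ported as a triple and rendered in that fixed insertion order — exact.
def categorized_counter (s : String) : List (String × List (String × Int)) :=
  let acc := s.toList.foldl pvStepA (PySem.Dict.mk [], PySem.Dict.mk [], PySem.Dict.mk [])
  [("alphabet", (pvMaxFilter acc.1).items),
   ("number", (pvMaxFilter acc.2.1).items),
   ("punctuation", (pvMaxFilter acc.2.2).items)]

-- ===== PORT B =====
-- Source B's 'c.lower() if c.isalpha() else c' (on a one-character string)
def pvKeyOf (c : Char) : String :=
  if PySem.Chars.isalpha c then String.ofList [PySem.Chars.lowerChar c] else String.ofList [c]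

-- Source B's 'bucket(pred)': distinct keys in first-appearance order, counts via norm.count
def pvBucket (norm : List String) (pred : String → Bool) : List (String × Int) :=
  let keys := norm.foldl (fun ks c => if pred c && !ks.contains c then ks ++ [c] else ks) []
  let counts : List Int := keys.map (fun k => PySem.List.count norm k)
  let m : Int := if counts.isEmpty then 0 else (PySem.List.max? counts (fun v => v)).getD 0
  (keys.zip counts).filter (fun p => p.2 == m)

def categorized_counter_alt (s : String) : List (String × List (String × Int)) :=
  let norm := (s.toList.filter (fun c => c != ' ')).map pvKeyOf
  [("alphabet", pvBucket norm PySem.Str.strIsalpha),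
   ("number", pvBucket norm PySem.Str.strIsdigit),
   ("punctuation", pvBucket norm (fun k => !PySem.Str.strIsalpha k && !PySem.Str.strIsdigit k))]

-- ===== PRECONDITION & SPEC =====
def Spec_categorized_counter (s : String) (out : List (String × List (String × Int))) : Prop := out = categorized_counter_alt s
instance (s : String) (out : List (String × List (String × Int))) : Decidable (Spec_categorized_counter s out) := by unfold Spec_categorized_counter; infer_instance

-- ===== CLAIM (what is proved, stated in full; the proofs are below) =====
def Claim_equal_categorized_counter : Prop := ∀ (s : String), Dom_categorized_counter s → Spec_categorized_counter s (categorized_counter s)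

-- ===== LEMMAS AND PROOFS =====

-- the normalized key list both sides are really counting
def pvNorm (cs : List Char) : List String := (cs.filter (fun c => c != ' ')).map pvKeyOf

-- character-level facts
theorem pv_alpha_not_digit (c : Char) (h : PySem.Chars.isalpha c = true) :
    PySem.Chars.isdigit c = false := by
  simp only [PySem.Chars.isalpha, PySem.Chars.isupper, PySem.Chars.islower,
    PySem.Chars.isdigit, Bool.or_eq_true, Bool.and_eq_true, decide_eq_true_eq, Char.le_def,
    UInt32.le_iff_toNat_le, Bool.and_eq_false_iff, decide_eq_false_iff_not, not_le] at h ⊢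
  rw [show ('A' : Char).val.toNat = 65 from rfl, show ('Z' : Char).val.toNat = 90 from rfl,
    show ('a' : Char).val.toNat = 97 from rfl, show ('z' : Char).val.toNat = 122 from rfl] at h
  rw [show ('0' : Char).val.toNat = 48 from rfl, show ('9' : Char).val.toNat = 57 from rfl]
  omega

theorem pv_isalpha_lower (c : Char) (h : PySem.Chars.isalpha c = true) :
    PySem.Chars.isalpha (PySem.Chars.lowerChar c) = true := by
  simp only [PySem.Chars.isalpha, PySem.Chars.lowerChar]
  by_cases hu : PySem.Chars.isupper c = true
  · simp only [hu, if_pos]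
    have h1 : 65 ≤ c.toNat ∧ c.toNat ≤ 90 := by
      simp only [PySem.Chars.isupper, Bool.and_eq_true, decide_eq_true_eq, Char.le_def,
        UInt32.le_iff_toNat_le] at hu
      exact ⟨hu.1, hu.2⟩
    have hval : (Char.ofNat (c.toNat + 32)).toNat = c.toNat + 32 := by
      rw [Char.toNat_ofNat, if_pos (Or.inl (by omega))]
    have hl : PySem.Chars.islower (Char.ofNat (c.toNat + 32)) = true := by
      simp only [PySem.Chars.islower, Bool.and_eq_true, decide_eq_true_eq, Char.le_def,
        UInt32.le_iff_toNat_le]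
      rw [show ('a' : Char).val.toNat = 97 from rfl, show ('z' : Char).val.toNat = 122 from rfl,
        show (Char.ofNat (c.toNat + 32)).val.toNat = (Char.ofNat (c.toNat + 32)).toNat from rfl,
        hval]
      omega
    simp [hl]
  · simp only [hu]
    simp only [PySem.Chars.isalpha] at h
    simp_all

-- class of the normalized key of one character, as the three single-char-string predicates see it
theorem pv_key_alpha (c : Char) (h : PySem.Chars.isalpha c = true) :
    PySem.Chars.strIsalpha (pvKeyOf c).toList = true ∧
    PySem.Chars.strIsdigit (pvKeyOf c).toList = false := by
  have hl := pv_isalpha_lower c h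
  have hd := pv_alpha_not_digit _ hl
  simp [pvKeyOf, h, PySem.Chars.strIsalpha, PySem.Chars.strIsdigit, hl, hd]

theorem pv_key_nonalpha (c : Char) (h : PySem.Chars.isalpha c = false) :
    PySem.Chars.strIsalpha (pvKeyOf c).toList = false ∧
    PySem.Chars.strIsdigit (pvKeyOf c).toList = PySem.Chars.isdigit c := by
  simp [pvKeyOf, h, PySem.Chars.strIsalpha, PySem.Chars.strIsdigit]

-- A's single dispatching loop is, per component, a bump-fold over the pred-filtered key list
theorem pv_dispatch (cs : List Char)
    (t : PySem.Dict String Int × PySem.Dict String Int × PySem.Dict String Int) :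
    cs.foldl pvStepA t =
      (((pvNorm cs).filter PySem.Str.strIsalpha).foldl pvBump t.1,
       ((pvNorm cs).filter PySem.Str.strIsdigit).foldl pvBump t.2.1,
       ((pvNorm cs).filter (fun k => !PySem.Str.strIsalpha k && !PySem.Str.strIsdigit k)).foldl
         pvBump t.2.2) := by
  induction cs generalizing t with
  | nil => rfl
  | cons c cs ih =>
    by_cases hsp : c = ' '
    · simp only [List.foldl_cons, pvStepA, hsp, if_pos, pvNorm, List.filter_cons]
      simpa [pvNorm] using ih t
    · have hne : (c != ' ') = true := by simp [hsp]
      have hnorm : pvNorm (c :: cs) = pvKeyOf c :: pvNorm cs := by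
        simp [pvNorm, hne]
      by_cases ha : PySem.Chars.isalpha c = true
      · obtain ⟨hA, hD⟩ := pv_key_alpha c ha
        have hstep : pvStepA t c = (pvBump t.1 (pvKeyOf c), t.2.1, t.2.2) := by
          simp [pvStepA, hsp, ha, pvKeyOf]
        rw [List.foldl_cons, hstep, ih, hnorm]
        simp [hA, hD]
      · have ha' : PySem.Chars.isalpha c = false := by simpa using ha
        obtain ⟨hA, hD⟩ := pv_key_nonalpha c ha'
        by_cases hd : PySem.Chars.isdigit c = true
        · have hstep : pvStepA t c = (t.1, pvBump t.2.1 (pvKeyOf c), t.2.2) := by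
            simp [pvStepA, hsp, ha', hd, pvKeyOf]
          rw [List.foldl_cons, hstep, ih, hnorm]
          simp [hA, hD, hd]
        · have hd' : PySem.Chars.isdigit c = false := by simpa using hd
          have hstep : pvStepA t c = (t.1, t.2.1, pvBump t.2.2 (pvKeyOf c)) := by
            simp [pvStepA, hsp, ha', hd', pvKeyOf]
          rw [List.foldl_cons, hstep, ih, hnorm]
          simp [hA, hD, hd']

-- A's bump is exactly the counter step
theorem pv_bump_eq_insert : pvBump = fun d k => d.insert k (d.getD k 0 + 1) := by
  funext d k
  by_cases h : d.contains k = true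
  · simp [pvBump, h]
  · have h' : d.contains k = false := by simpa using h
    simp [pvBump, h', PySem.Dict.getD_of_not_contains d 0 h']

-- B's keys loop is the pred-filtered ordered-dedup fold
theorem pv_keys_fold (pred : String → Bool) (norm : List String) (s : List String) :
    norm.foldl (fun ks c => if pred c && !ks.contains c then ks ++ [c] else ks) s =
      (norm.filter pred).foldl PySem.Set.add s := by
  induction norm generalizing s with
  | nil => rfl
  | cons c norm ih =>
    by_cases hp : pred c = true
    · rw [List.foldl_cons, List.filter_cons_of_pos hp, List.foldl_cons]
      have : (if pred c && !s.contains c then s ++ [c] else s) = PySem.Set.add s c := by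
        simp only [PySem.Set.add, PySem.Set.contains, hp, Bool.true_and]
        by_cases hc : s.contains c = true <;> simp_all
      rw [this, ih]
    · have hp' : pred c = false := by simpa using hp
      rw [List.foldl_cons, List.filter_cons_of_neg (by simp [hp']), if_neg (by simp [hp'])]
      exact ih s

-- one bucket: A's counted-then-filtered dict equals B's keys/counts construction
theorem pv_bucket_eq (pred : String → Bool) (norm : List String) :
    (pvMaxFilter ((norm.filter pred).foldl pvBump (PySem.Dict.mk []))).items =
      pvBucket norm pred := by
  have hd : (norm.filter pred).foldl pvBump (PySem.Dict.mk []) =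
      PySem.Dict.counter (norm.filter pred) := by
    rw [pv_bump_eq_insert]
    exact PySem.Dict.foldl_insert_getD_add_one_eq_counter (norm.filter pred)
  have hitems : ((norm.filter pred).foldl pvBump (PySem.Dict.mk [])).items =
      (PySem.Set.ofList (norm.filter pred)).map
        (fun k => (k, (List.count k (norm.filter pred) : Int))) := by
    rw [hd]; exact PySem.Dict.items_counter (norm.filter pred)
  have hkeys : norm.foldl (fun ks c => if pred c && !ks.contains c then ks ++ [c] else ks) [] =
      PySem.Set.ofList (norm.filter pred) := pv_keys_fold pred norm []
  -- on the collected keys, counting in norm is counting in the pred-filtered norm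
  have hcounts : (PySem.Set.ofList (norm.filter pred)).map
        (fun k => (PySem.List.count norm k : Int)) =
      (PySem.Set.ofList (norm.filter pred)).map
        (fun k => (List.count k (norm.filter pred) : Int)) := by
    apply List.map_congr_left
    intro k hk
    have hpk : pred k = true :=
      List.of_mem_filter ((PySem.Set.mem_ofList (norm.filter pred) k).mp hk)
    rw [PySem.List.count_eq, List.count_filter hpk]
  simp only [pvBucket, hkeys, hcounts, ← List.map_prod_left_eq_zip]
  simp only [pvMaxFilter, PySem.Dict.values, hitems, List.map_map]
  have hm : ((PySem.Set.ofList (norm.filter pred)).map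
        (fun k => (k, (List.count k (norm.filter pred) : Int)))).isEmpty =
      ((PySem.Set.ofList (norm.filter pred)).map
        (fun k => (List.count k (norm.filter pred) : Int))).isEmpty := by
    simp
  have hc : ((fun kv => kv.2) ∘ fun k => (k, (List.count k (norm.filter pred) : Int))) =
      fun k => (List.count k (norm.filter pred) : Int) := rfl
  rw [hm, hc]

-- ===== VERDICT (by name: the statement is the Claim_ definition above) =====
theorem categorized_counter_spec : Claim_equal_categorized_counter := by
  intro s _
  unfold Spec_categorized_counter
  simp only [categorized_counter, categorized_counter_alt, pv_dispatch]
  rw [pv_bucket_eq PySem.Str.strIsalpha (pvNorm s.toList),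
    pv_bucket_eq PySem.Str.strIsdigit (pvNorm s.toList),
    pv_bucket_eq (fun k => !PySem.Str.strIsalpha k && !PySem.Str.strIsdigit k) (pvNorm s.toList)]
  rfl
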